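-- pv_equiv track=rewrite | github.com/triet4p/agent-memory-cognitive | cogmem_api/engine/retain/chunking.py | _render_chunk
-- ===== SOURCE A (Python) =====
-- from typing import NamedTuple
--
-- class RoleSegment(NamedTuple):
--     """A sentence with its role marker and source message index."""
--
--     role: str
--     sentence: str
--     msg_idx: int
--
-- def _render_chunk(segments: list[RoleSegment], is_first: bool) -> str:
--     """Render a list of (role, sentence) into a chunk string with role markers.
--
--     A role marker is emitted when:
--     (a) it is the first segment of the chunk, OR
--     (b) the role differs from the previous segment in this chunk.
--     """
--     parts = []
--     prev_role: str | None = None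
--     for role, sentence, _ in segments:
--         emit_marker = is_first or role != prev_role
--         marker = f"[{role}]: " if emit_marker else ""
--         parts.append(f"{marker}{sentence}")
--         prev_role = role
--         is_first = False
--     return " ".join(parts)
-- ===== SOURCE B (Python) =====
-- def _render_chunk(segments, is_first):
--     """Render segments run-by-run: one role marker per maximal run of
--     consecutive segments sharing a role.  A's is_first flag is provably
--     irrelevant (the first comparison is str != None, always True), so it
--     is ignored."""
--     parts = []
--     i = 0
--     n = len(segments)
--     while i < n:
--         role = segments[i][0]
--         j = i + 1
--         while j < n and segments[j][0] == role:
--             j += 1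
--         parts.append(f"[{role}]: " + " ".join(seg[1] for seg in segments[i:j]))
--         i = j
--     return " ".join(parts)
-- ===== Notes on version B (the rewrite author's own statement) =====
-- stated objective: alternative
-- what changed: B groups segments into maximal runs of consecutive equal roles and emits one '[role]: ' marker per run followed by the run's sentences joined with spaces, instead of A's per-segment loop threading prev_role/is_first state; A's is_first flag is provably irrelevant (the first comparison is a str against None, always unequal), so B ignores it.
import Mathlib
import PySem

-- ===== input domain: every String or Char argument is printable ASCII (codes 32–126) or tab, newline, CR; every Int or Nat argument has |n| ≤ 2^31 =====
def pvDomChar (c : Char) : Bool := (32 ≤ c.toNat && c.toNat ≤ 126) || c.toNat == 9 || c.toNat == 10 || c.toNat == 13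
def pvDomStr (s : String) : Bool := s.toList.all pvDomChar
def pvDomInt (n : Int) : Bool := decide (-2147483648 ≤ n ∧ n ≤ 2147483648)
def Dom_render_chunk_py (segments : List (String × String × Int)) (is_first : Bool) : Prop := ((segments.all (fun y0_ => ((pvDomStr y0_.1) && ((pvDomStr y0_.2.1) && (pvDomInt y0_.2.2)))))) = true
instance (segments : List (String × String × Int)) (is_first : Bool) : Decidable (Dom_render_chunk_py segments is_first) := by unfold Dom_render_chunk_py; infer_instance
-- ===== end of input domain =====

-- B renders segments run-by-run (one marker per maximal run of equal consecutive roles)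
-- instead of A's per-segment loop threading prev_role/is_first state; same output, 'alternative' objective.


-- ===== PORT A =====
-- loop body of A: parts.append(marker+sentence); prev_role = role; is_first = False
def stepA (st : List String × Option String × Bool) (seg : String × String × Int) :
    List String × Option String × Bool :=
  let emit := st.2.2 || (some seg.1 != st.2.1)
  let marker := if emit then "[" ++ seg.1 ++ "]: " else ""
  (st.1 ++ [marker ++ seg.2.1], some seg.1, false)

def render_chunk_py (segments : List (String × String × Int)) (is_first : Bool) : String :=
  PySem.Str.join " " (segments.foldl stepA ([], none, is_first)).1

-- ===== PORT B =====
-- outer while loop of B: one (role, sentences-of-the-run) pair per maximal run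
def runsB : List (String × String × Int) → List (String × List String)
  | [] => []
  | seg :: rest =>
    (seg.1, seg.2.1 :: (rest.takeWhile (fun t => t.1 == seg.1)).map (fun t => t.2.1))
      :: runsB (rest.dropWhile (fun t => t.1 == seg.1))
termination_by segs => segs.length
decreasing_by simpa using Nat.lt_succ_of_le (List.length_dropWhile_le _ _)

def renderRun (p : String × List String) : String :=
  "[" ++ p.1 ++ "]: " ++ PySem.Str.join " " p.2

def render_chunk_py_alt (segments : List (String × String × Int)) (is_first : Bool) : String :=
  PySem.Str.join " " ((runsB segments).map renderRun)

-- ===== PRECONDITION & SPEC =====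
def Spec_render_chunk_py (segments : List (String × String × Int)) (is_first : Bool) (out : String) : Prop := out = render_chunk_py_alt segments is_first
instance (segments : List (String × String × Int)) (is_first : Bool) (out : String) : Decidable (Spec_render_chunk_py segments is_first out) := by unfold Spec_render_chunk_py; infer_instance

-- ===== CLAIM (what is proved, stated in full; the proofs are below) =====
def Claim_equal_render_chunk_py : Prop := ∀ (segments : List (String × String × Int)) (is_first : Bool), Dom_render_chunk_py segments is_first → Spec_render_chunk_py segments is_first (render_chunk_py segments is_first)

-- ===== LEMMAS AND PROOFS =====

-- A's loop, flattened to the list of rendered parts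
def partsA : Bool → Option String → List (String × String × Int) → List String
  | _, _, [] => []
  | first, prev, seg :: rest =>
    ((if (first || (some seg.1 != prev)) = true then "[" ++ seg.1 ++ "]: " else "") ++ seg.2.1)
      :: partsA false (some seg.1) rest

lemma loopA (segs : List (String × String × Int)) :
    ∀ (parts : List String) (prev : Option String) (first : Bool),
    (segs.foldl stepA (parts, prev, first)).1 = parts ++ partsA first prev segs := by
  induction segs with
  | nil => intro parts prev first; simp [partsA]
  | cons seg rest ih =>
      intro parts prev first
      simp only [List.foldl_cons, stepA, partsA, ih]
      simp

-- characters contributed by a list of parts, each preceded by the joining space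
def flat (L : List String) : List Char :=
  (L.map String.toList).flatMap (fun y => ' ' :: y)

lemma flat_cons (x : String) (L : List String) :
    flat (x :: L) = ' ' :: (x.toList ++ flat L) := by
  simp [flat]

lemma flat_append (L1 L2 : List String) : flat (L1 ++ L2) = flat L1 ++ flat L2 := by
  simp [flat]

lemma join_cons_flat (sep : List Char) (x : List Char) (t : List (List Char)) :
    PySem.Chars.join sep (x :: t) = x ++ t.flatMap (fun y => sep ++ y) := by
  induction t generalizing x with
  | nil => simp [PySem.Chars.join_singleton]
  | cons y t ih => rw [PySem.Chars.join_cons_cons, ih y]; simp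

lemma toList_join_space (L : List String) :
    (PySem.Str.join " " L).toList = PySem.Chars.join [' '] (L.map String.toList) := by
  rw [PySem.Str.toList_join]; rfl

lemma toList_join_space_cons (x : String) (t : List String) :
    (PySem.Str.join " " (x :: t)).toList = x.toList ++ flat t := by
  rw [toList_join_space, List.map_cons, join_cons_flat]; rfl

-- a run of segments all sharing the previous role contributes bare sentences
lemma partsA_run (r : String) :
    ∀ (run rest' : List (String × String × Int)), (∀ t ∈ run, t.1 = r) →
    partsA false (some r) (run ++ rest')
      = run.map (fun t => t.2.1) ++ partsA false (some r) rest' := by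
  intro run
  induction run with
  | nil => intro rest' _; simp
  | cons t run ih =>
      intro rest' h
      have ht : t.1 = r := h t (by simp)
      simp only [List.cons_append, partsA, ht, List.map_cons, List.cons.injEq]
      constructor
      · simp
      · exact ih rest' (fun u hu => h u (by simp [hu]))

lemma main_flat : ∀ (n : Nat) (segs : List (String × String × Int)), segs.length ≤ n →
    ∀ (first : Bool) (prev : Option String),
    (∀ t ∈ segs.head?, (first || (some t.1 != prev)) = true) →
    flat (partsA first prev segs) = flat ((runsB segs).map renderRun) := by
  intro n
  induction n with
  | zero =>
      intro segs hlen first prev _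
      have h0 : segs = [] := List.eq_nil_of_length_eq_zero (Nat.le_zero.mp hlen)
      subst h0; simp [partsA, runsB]
  | succ n ih =>
      intro segs hlen first prev hemit
      match segs with
      | [] => simp [partsA, runsB]
      | seg :: rest =>
          have hem : (first || (some seg.1 != prev)) = true := hemit seg (by simp)
          rw [runsB]
          have hsplit : rest = rest.takeWhile (fun t => t.1 == seg.1)
              ++ rest.dropWhile (fun t => t.1 == seg.1) :=
            (List.takeWhile_append_dropWhile).symm
          simp only [partsA, hem]
          rw [show partsA false (some seg.1) rest
              = partsA false (some seg.1) (rest.takeWhile (fun t => t.1 == seg.1)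
                ++ rest.dropWhile (fun t => t.1 == seg.1)) from by rw [← hsplit]]
          rw [partsA_run seg.1 _ _ (fun t ht => beq_iff_eq.mp (List.mem_takeWhile_imp (p := fun u : String × String × Int => u.1 == seg.1) ht))]
          have hrec : flat (partsA false (some seg.1) (rest.dropWhile (fun t => t.1 == seg.1)))
              = flat ((runsB (rest.dropWhile (fun t => t.1 == seg.1))).map renderRun) := by
            apply ih
            · have h1 := List.length_dropWhile_le (fun t : String × String × Int => t.1 == seg.1) rest
              simp only [List.length_cons] at hlen
              omega
            · intro t ht
              have hne : (t.1 == seg.1) = false := by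
                have h0 := List.head?_dropWhile_not (fun u : String × String × Int => u.1 == seg.1) rest
                rcases hd : (rest.dropWhile (fun u : String × String × Int => u.1 == seg.1)).head? with _ | u
                · rw [hd] at ht; simp at ht
                · rw [hd] at h0 ht; simp at ht; subst ht; exact h0
              simp [bne, hne]
          simp only [List.map_cons, flat_cons, flat_append, hrec, renderRun,
            toList_join_space_cons, String.toList_append]
          simp [flat]

-- ===== VERDICT (by name: the statement is the Claim_ definition above) =====
theorem render_chunk_py_spec : Claim_equal_render_chunk_py := by
  intro segments is_first _
  unfold Spec_render_chunk_py render_chunk_py render_chunk_py_alt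
  rw [show (segments.foldl stepA ([], none, is_first)).1 = partsA is_first none segments from by
    simpa using loopA segments [] none is_first]
  have hflat : flat (partsA is_first none segments) = flat ((runsB segments).map renderRun) :=
    main_flat segments.length segments le_rfl is_first none (by intro t _; simp)
  match segments with
  | [] => simp [partsA, runsB]
  | seg :: rest =>
      apply String.toList_inj.mp
      rw [runsB] at hflat ⊢
      simp only [partsA, List.map_cons, flat_cons, List.cons.injEq, true_and] at hflat
      simp only [partsA, List.map_cons]
      rw [toList_join_space_cons, toList_join_space_cons]
      exact hflat
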